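-- pv_equiv track=rewrite | github.com/Sim-mi-gyeong/Algorithm | Programmers/완전탐색/모의고사.py | solution
-- ===== SOURCE A (Python) =====
-- def solution(answers):
--     answer = []
--     cnt1, cnt2, cnt3 = 0, 0, 0
--     lst1 = [1, 2, 3, 4, 5]
--     lst2 = [2, 1, 2, 3, 2, 4, 2, 5]
--     lst3 = [3, 3, 1, 1, 2, 2, 4, 4, 5, 5]
--
--     for i, ans in enumerate(answers):
--         if ans == lst1[i % len(lst1)]:
--             cnt1 += 1
--         if ans == lst2[i % len(lst2)]:
--             cnt2 += 1
--         if ans == lst3[i % len(lst3)]: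
--             cnt3 += 1
--
--     result = [cnt1, cnt2, cnt3]
--     maxVal = max(result)
--     answer = [i + 1 for i, v in enumerate(result) if v == maxVal]
--
--     return answer
-- ===== SOURCE B (Python) =====
-- def solution(answers):
--     # Histogram approach: pattern values repeat with period lcm(5,8,10)=40, so a
--     # pattern's score depends only on how many times each (i % 40, value) pair
--     # occurs.  Build that histogram in one pass, then read each pattern's score
--     # off the histogram with 40 lookups (no per-pattern scan of answers).
--     hist = {}
--     for i, ans in enumerate(answers):
--         k = (i % 40, ans)
--         hist[k] = hist.get(k, 0) + 1
--     patterns = [[1, 2, 3, 4, 5],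
--                 [2, 1, 2, 3, 2, 4, 2, 5],
--                 [3, 3, 1, 1, 2, 2, 4, 4, 5, 5]]
--     counts = [sum(hist.get((r, pat[r % len(pat)]), 0) for r in range(40))
--               for pat in patterns]
--     m = max(counts)
--     return [k + 1 for k, c in enumerate(counts) if c == m]
-- ===== Notes on version B (the rewrite author's own statement) =====
-- stated objective: alternative
-- what changed: B replaces per-element pattern comparisons by a histogram: one pass builds a dict counting occurrences of each (index mod 40, value) pair (40 = lcm of the pattern periods), and each pattern's score is then read off with 40 dict lookups without scanning answers again; the max/filter tail is unchanged.
import Mathlib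
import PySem

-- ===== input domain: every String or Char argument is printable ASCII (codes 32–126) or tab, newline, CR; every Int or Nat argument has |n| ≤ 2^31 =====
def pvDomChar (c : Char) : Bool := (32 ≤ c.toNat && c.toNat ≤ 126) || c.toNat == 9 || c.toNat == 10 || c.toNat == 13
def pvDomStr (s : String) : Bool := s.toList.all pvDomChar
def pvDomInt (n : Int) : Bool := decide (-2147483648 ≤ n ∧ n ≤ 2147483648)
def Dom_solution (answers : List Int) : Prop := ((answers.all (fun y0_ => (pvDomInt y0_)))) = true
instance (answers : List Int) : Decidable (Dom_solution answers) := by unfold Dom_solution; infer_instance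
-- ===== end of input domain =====

-- B replaces A's per-element pattern comparisons by a histogram over (i % 40, value) pairs
-- (40 = lcm of the three pattern periods); each pattern's score is then 40 dict lookups (objective: alternative).

-- ===== PORT A =====
def solution (answers : List Int) : List Int :=
  let lst1 : List Int := [1, 2, 3, 4, 5]
  let lst2 : List Int := [2, 1, 2, 3, 2, 4, 2, 5]
  let lst3 : List Int := [3, 3, 1, 1, 2, 2, 4, 4, 5, 5]
  -- for i, ans in enumerate(answers): three if-tests updating cnt1, cnt2, cnt3
  let c := (PySem.List.enumerate answers 0).foldl
    (fun (c : Int × Int × Int) p =>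
      let c1 := if p.2 = PySem.List.pyGetD lst1 (PySem.Int.mod p.1 (lst1.length : Int)) 0 then c.1 + 1 else c.1
      let c2 := if p.2 = PySem.List.pyGetD lst2 (PySem.Int.mod p.1 (lst2.length : Int)) 0 then c.2.1 + 1 else c.2.1
      let c3 := if p.2 = PySem.List.pyGetD lst3 (PySem.Int.mod p.1 (lst3.length : Int)) 0 then c.2.2 + 1 else c.2.2
      (c1, c2, c3)) (0, 0, 0)
  let result : List Int := [c.1, c.2.1, c.2.2]
  let maxVal := (PySem.List.max? result (fun x => x)).getD 0  -- result has 3 elements, so max? is some; getD default never used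
  (PySem.List.enumerate result 0).foldl (fun acc p => if p.2 = maxVal then acc ++ [p.1 + 1] else acc) []

-- ===== PORT B =====
def solution_alt (answers : List Int) : List Int :=
  -- hist[k] = hist.get(k, 0) + 1 over the keys (i % 40, ans)
  let hist := (PySem.List.enumerate answers 0).foldl
    (fun (d : PySem.Dict (Int × Int) Int) p =>
      let k := (PySem.Int.mod p.1 40, p.2)
      d.insert k (d.getD k 0 + 1)) PySem.Dict.empty
  let patterns : List (List Int) := [[1, 2, 3, 4, 5], [2, 1, 2, 3, 2, 4, 2, 5], [3, 3, 1, 1, 2, 2, 4, 4, 5, 5]]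
  -- counts = [sum(hist.get((r, pat[r % len(pat)]), 0) for r in range(40)) for pat in patterns]
  let counts := patterns.map (fun pat =>
    ((PySem.List.pyRange 0 40).map (fun r =>
      hist.getD (r, PySem.List.pyGetD pat (PySem.Int.mod r (pat.length : Int)) 0) 0)).sum)
  let maxVal := (PySem.List.max? counts (fun x => x)).getD 0  -- counts has 3 elements, so max? is some
  (PySem.List.enumerate counts 0).foldl (fun acc p => if p.2 = maxVal then acc ++ [p.1 + 1] else acc) []

-- ===== PRECONDITION & SPEC =====
def Spec_solution (answers : List Int) (out : List Int) : Prop := out = solution_alt answers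
instance (answers : List Int) (out : List Int) : Decidable (Spec_solution answers out) := by unfold Spec_solution; infer_instance

-- ===== CLAIM (what is proved, stated in full; the proofs are below) =====
def Claim_equal_solution : Prop := ∀ (answers : List Int), Dom_solution answers → Spec_solution answers (solution answers)

-- ===== LEMMAS AND PROOFS =====

-- A's single fold with a triple of counters equals three independent counting folds.
theorem foldl_triple_split (q1 q2 q3 : Int × Int → Prop) [DecidablePred q1] [DecidablePred q2] [DecidablePred q3] :
    ∀ (l : List (Int × Int)) (c1 c2 c3 : Int),
      l.foldl (fun (c : Int × Int × Int) p =>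
          (if q1 p then c.1 + 1 else c.1,
           if q2 p then c.2.1 + 1 else c.2.1,
           if q3 p then c.2.2 + 1 else c.2.2)) (c1, c2, c3)
      = (l.foldl (fun s p => if q1 p then s + 1 else s) c1,
         l.foldl (fun s p => if q2 p then s + 1 else s) c2,
         l.foldl (fun s p => if q3 p then s + 1 else s) c3) := by
  intro l
  induction l with
  | nil => intro c1 c2 c3; rfl
  | cons h t ih => intro c1 c2 c3; simp only [List.foldl_cons]; exact ih _ _ _

-- A's counting fold, in the exact Prop-ite shape of the port, as a countP (cites PySem.List.foldl_count_if).
theorem fold_if_eq_countP (X : Int × Int → Int) (l : List (Int × Int)) (a : Int) :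
    l.foldl (fun (s : Int) p => if p.2 = X p then s + 1 else s) a
      = a + (l.countP (fun p => p.2 == X p) : Int) := by
  simpa using PySem.List.foldl_count_if (fun p : Int × Int => p.2 == X p) l a

-- One element contributes to exactly one residue slot: summing the indicator over a Nodup list containing a.1.
theorem sum_indicator (q : Int → Int) (a : Int × Int) :
    ∀ (R : List Int), R.Nodup → a.1 ∈ R →
      (R.map (fun r => if ((r, q r) == a) = true then (1 : Int) else 0)).sum
        = if (a.2 == q a.1) = true then 1 else 0 := by
  intro R
  induction R with
  | nil => intro _ h; cases h
  | cons r0 R' ih =>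
    intro hnd hmem
    simp only [List.nodup_cons] at hnd
    simp only [List.map_cons, List.sum_cons]
    by_cases h0 : a.1 = r0
    · have hz : (R'.map (fun r => if ((r, q r) == a) = true then (1 : Int) else 0)).sum = 0 := by
        apply List.sum_eq_zero
        intro x hx
        simp only [List.mem_map] at hx
        obtain ⟨r, hr, hxe⟩ := hx
        have hne : ¬ ((r, q r) == a) = true := by
          simp only [beq_iff_eq]
          intro he
          have hr0 : r0 = r := by rw [← h0, ← he]
          exact hnd.1 (hr0 ▸ hr)
        simp [hne] at hxe
        omega
      rw [hz]
      rcases a with ⟨a1, a2⟩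
      simp only at h0
      subst h0
      by_cases h2 : a2 = q a1
      · simp [h2]
      · simp [h2, Prod.ext_iff]
        exact fun h => h2 h.symm
    · have hmem' : a.1 ∈ R' := by
        rcases List.mem_cons.mp hmem with h | h
        · exact absurd h h0
        · exact h
      rw [ih hnd.2 hmem']
      have : ¬ ((r0, q r0) == a) = true := by
        simp only [beq_iff_eq]
        intro he
        exact h0 (by rw [← he])
      simp [this]

-- Summing per-slot counts over the residue list equals counting matches, when every key's residue is in the list.
theorem sum_count_eq_countP (q : Int → Int) (R : List Int) (hnd : R.Nodup) :
    ∀ (L : List (Int × Int)), (∀ p ∈ L, p.1 ∈ R) →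
      (R.map (fun r => (L.count (r, q r) : Int))).sum
        = (L.countP (fun p => p.2 == q p.1) : Int) := by
  intro L
  induction L with
  | nil => intro _; simp
  | cons a L' ih =>
    intro hL
    have hstep : (R.map (fun r => ((a :: L').count (r, q r) : Int))).sum
        = (R.map (fun r => (L'.count (r, q r) : Int))).sum
          + (R.map (fun r => if ((r, q r) == a) = true then (1 : Int) else 0)).sum := by
      rw [← List.sum_map_add]
      congr 1
      apply List.map_congr_left
      intro r _
      rw [List.count_cons]
      push_cast
      rw [show (a == (r, q r)) = ((r, q r) == a) from
        Bool.eq_iff_iff.mpr (by simp [beq_iff_eq]; exact eq_comm)]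
    rw [hstep, ih (fun p hp => hL p (List.mem_cons_of_mem _ hp)),
        sum_indicator q a R hnd (hL a (List.mem_cons_self))]
    rw [List.countP_cons]
    by_cases h : (a.2 == q a.1) = true <;> simp [h]

-- The B-side score of one pattern equals the A-side match count, for a pattern whose length divides 40.
theorem pattern_count (pat : List Int) (hdvd : (pat.length : Int) ∣ 40) (hpos : 0 < (pat.length : Int))
    (answers : List Int) :
    ((PySem.List.pyRange 0 40).map (fun r =>
        (PySem.Dict.counter ((PySem.List.enumerate answers 0).map (fun p => (PySem.Int.mod p.1 40, p.2)))).getD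
          (r, PySem.List.pyGetD pat (PySem.Int.mod r (pat.length : Int)) 0) 0)).sum
      = 0 + ((PySem.List.enumerate answers 0).countP
          (fun p => p.2 == PySem.List.pyGetD pat (PySem.Int.mod p.1 (pat.length : Int)) 0) : Int) := by
  have hmod : ∀ i : Int, PySem.Int.mod (PySem.Int.mod i 40) (pat.length : Int) = PySem.Int.mod i (pat.length : Int) := by
    intro i
    rw [PySem.Int.mod_eq_emod_of_pos hpos, PySem.Int.mod_eq_emod_of_pos hpos,
        PySem.Int.mod_eq_emod_of_pos (by norm_num : (0:Int) < 40)]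
    exact Int.emod_emod_of_dvd _ hdvd
  have hnd : (PySem.List.pyRange 0 40).Nodup := by decide
  have hL : ∀ p ∈ (PySem.List.enumerate answers 0).map (fun p => (PySem.Int.mod p.1 40, p.2)),
      p.1 ∈ PySem.List.pyRange (0 : Int) 40 := by
    intro p hp
    simp only [List.mem_map] at hp
    obtain ⟨e, _, he⟩ := hp
    rw [← he]
    exact PySem.List.mem_pyRange_one.mpr
      ⟨PySem.Int.mod_nonneg _ (by norm_num), PySem.Int.mod_lt _ (by norm_num)⟩
  simp only [PySem.Dict.getD_counter]
  rw [sum_count_eq_countP (fun r => PySem.List.pyGetD pat (PySem.Int.mod r (pat.length : Int)) 0)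
        (PySem.List.pyRange 0 40) hnd _ hL]
  rw [List.countP_map]
  simp only [Function.comp_def, hmod]
  omega

-- B's get-then-insert histogram loop over (i % 40, ans) keys is the counter of the key list.
theorem hist_eq (l : List (Int × Int)) :
    l.foldl (fun (d : PySem.Dict (Int × Int) Int) p =>
        d.insert (PySem.Int.mod p.1 40, p.2) (d.getD (PySem.Int.mod p.1 40, p.2) 0 + 1)) PySem.Dict.empty
      = PySem.Dict.counter (l.map (fun p => (PySem.Int.mod p.1 40, p.2))) := by
  rw [← PySem.Dict.foldl_insert_getD_add_one_eq_counter, List.foldl_map]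

theorem solution_spec : Claim_equal_solution := by
  intro answers _
  unfold Spec_solution solution solution_alt
  dsimp only
  rw [hist_eq]
  simp only [List.map]
  rw [foldl_triple_split]
  rw [fold_if_eq_countP, fold_if_eq_countP, fold_if_eq_countP]
  simp only [pattern_count [1, 2, 3, 4, 5] (by norm_num) (by norm_num),
      pattern_count [2, 1, 2, 3, 2, 4, 2, 5] (by norm_num) (by norm_num),
      pattern_count [3, 3, 1, 1, 2, 2, 4, 4, 5, 5] (by norm_num) (by norm_num)]
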